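-- pv_equiv track=rewrite | github.com/owid/etl | etl/steps/data/garden/artificial_intelligence/2026-01-30/mmlu.py | assign_region
-- ===== SOURCE A (Python) =====
-- EUROPE_COUNTRIES = {
--     "France",
--     "United Kingdom of Great Britain and Northern Ireland",
--     "Germany",
-- }
--
-- COUNTRY_NAME_MAP = {
--     "United States of America": "United States",
--     "United Arab Emirates": "United Arab Emirates",
--     "Canada": "Canada",
--     "China": "China",
-- }
--
-- def assign_region(country_str: str) -> str:
--     """Assign a country (or comma-separated list of countries) to a region.
--
--     Multi-country models are assigned based on a priority: China > United States > Europe > other.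
--     France, the United Kingdom, and Germany are merged into 'Europe'.
--     """
--     countries = [c.strip() for c in country_str.split(",")]
--
--     has_china = any("China" in c for c in countries)
--     has_us = any("United States" in c for c in countries)
--     has_europe = any(c in EUROPE_COUNTRIES for c in countries)
--     has_uae = any("United Arab Emirates" in c for c in countries)
--     has_canada = any("Canada" in c for c in countries)
--
--     if has_china:
--         return "China"
--     if has_us:
--         return "United States"
--     if has_europe:
--         return "Europe"
--     if has_uae:
--         return "United Arab Emirates"
--     if has_canada:
--         return "Canada"
--     # Fallback: use the first listed country (simplified)
--     first = countries[0]
--     return COUNTRY_NAME_MAP.get(first, first)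
-- ===== SOURCE B (Python) =====
-- EUROPE_COUNTRIES = {
--     "France",
--     "United Kingdom of Great Britain and Northern Ireland",
--     "Germany",
-- }
--
-- COUNTRY_NAME_MAP = {
--     "United States of America": "United States",
--     "United Arab Emirates": "United Arab Emirates",
--     "Canada": "Canada",
--     "China": "China",
-- }
--
-- _REGIONS = ["China", "United States", "Europe", "United Arab Emirates", "Canada"]
--
--
-- def _rank(c):
--     """Priority rank of a single country: lower = higher region priority, 5 = no region."""
--     if "China" in c:
--         return 0
--     if "United States" in c:
--         return 1
--     if c in EUROPE_COUNTRIES: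
--         return 2
--     if "United Arab Emirates" in c:
--         return 3
--     if "Canada" in c:
--         return 4
--     return 5
--
--
-- def assign_region(country_str: str) -> str:
--     countries = [c.strip() for c in country_str.split(",")]
--     best = min((_rank(c) for c in countries), default=5)
--     if best < 5:
--         return _REGIONS[best]
--     first = countries[0]
--     return COUNTRY_NAME_MAP.get(first, first)
-- ===== Notes on version B (the rewrite author's own statement) =====
-- stated objective: alternative
-- what changed: Replaces the five separate any(...) scans and the five-way boolean cascade with a per-country priority rank (0=China .. 4=Canada, 5=none) and a single min over the ranks, indexing a region table with the best rank.
import Mathlib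
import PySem

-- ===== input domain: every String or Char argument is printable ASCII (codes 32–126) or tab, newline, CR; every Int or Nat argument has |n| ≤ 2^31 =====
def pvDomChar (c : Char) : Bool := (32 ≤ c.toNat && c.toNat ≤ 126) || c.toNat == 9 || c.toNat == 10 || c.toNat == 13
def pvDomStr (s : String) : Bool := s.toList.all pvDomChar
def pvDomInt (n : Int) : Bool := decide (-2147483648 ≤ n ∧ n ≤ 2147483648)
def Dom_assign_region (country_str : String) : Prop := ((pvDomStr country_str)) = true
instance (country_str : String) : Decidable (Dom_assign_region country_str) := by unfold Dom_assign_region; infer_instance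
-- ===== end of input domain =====

-- B replaces A's five any(...) scans + boolean cascade by a per-country priority rank and one min
-- over the ranks (alternative decomposition, same cost class).

-- ===== PORT A =====
def pvEurope : List String :=
  ["France", "United Kingdom of Great Britain and Northern Ireland", "Germany"]

def pvCountryNameMap : PySem.Dict String String :=
  PySem.Dict.ofList
    [("United States of America", "United States"),
     ("United Arab Emirates", "United Arab Emirates"),
     ("Canada", "Canada"),
     ("China", "China")]

def assign_region (country_str : String) : String :=
  let countries := ((PySem.Str.split? country_str ",").getD []).map PySem.Str.strip
  let has_china := countries.any (fun c => PySem.Str.isIn "China" c)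
  let has_us := countries.any (fun c => PySem.Str.isIn "United States" c)
  let has_europe := countries.any (fun c => pvEurope.contains c)
  let has_uae := countries.any (fun c => PySem.Str.isIn "United Arab Emirates" c)
  let has_canada := countries.any (fun c => PySem.Str.isIn "Canada" c)
  if has_china then "China"
  else if has_us then "United States"
  else if has_europe then "Europe"
  else if has_uae then "United Arab Emirates"
  else if has_canada then "Canada"
  else
    -- countries[0]: split always yields a nonempty list, so the .getD "" default is unreachable
    let first := (PySem.List.pyGet? countries 0).getD ""
    PySem.Dict.getD pvCountryNameMap first first

-- ===== PORT B =====
def pvRegions : List String :=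
  ["China", "United States", "Europe", "United Arab Emirates", "Canada"]

def pvRank (c : String) : Int :=
  if PySem.Str.isIn "China" c then 0
  else if PySem.Str.isIn "United States" c then 1
  else if pvEurope.contains c then 2
  else if PySem.Str.isIn "United Arab Emirates" c then 3
  else if PySem.Str.isIn "Canada" c then 4
  else 5

def assign_region_alt (country_str : String) : String :=
  let countries := ((PySem.Str.split? country_str ",").getD []).map PySem.Str.strip
  let best := PySem.List.minD (countries.map pvRank) id 5
  if best < 5 then
    -- _REGIONS[best]: in the guarded branch 0 ≤ best < 5, so the .getD "" default is unreachable
    (PySem.List.pyGet? pvRegions best).getD ""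
  else
    -- countries[0]: split always yields a nonempty list, so the .getD "" default is unreachable
    let first := (PySem.List.pyGet? countries 0).getD ""
    PySem.Dict.getD pvCountryNameMap first first

-- ===== PRECONDITION & SPEC =====
def Spec_assign_region (country_str : String) (out : String) : Prop := out = assign_region_alt country_str
instance (country_str : String) (out : String) : Decidable (Spec_assign_region country_str out) := by unfold Spec_assign_region; infer_instance

-- ===== CLAIM (what is proved, stated in full; the proofs are below) =====
def Claim_equal_assign_region : Prop := ∀ (country_str : String), Dom_assign_region country_str → Spec_assign_region country_str (assign_region country_str)

-- ===== LEMMAS AND PROOFS =====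

theorem pvRank_le_five (c : String) : pvRank c ≤ 5 := by
  unfold pvRank; split_ifs <;> omega

-- foldl min never exceeds its accumulator
theorem pv_foldl_min_le (xs : List Int) : ∀ a : Int, xs.foldl min a ≤ a := by
  induction xs with
  | nil => intro a; simp
  | cons x xs ih =>
    intro a
    calc (x :: xs).foldl min a = xs.foldl min (min a x) := by simp
    _ ≤ min a x := ih _
    _ ≤ a := min_le_left _ _

-- accumulator-monotonicity for foldl min
theorem pv_foldl_min_acc (xs : List Int) :
    ∀ a b : Int, a ≤ b → xs.foldl min a = min a (xs.foldl min b) := by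
  induction xs with
  | nil => intro a b h; simp [min_eq_left h]
  | cons x xs ih =>
    intro a b h
    have hx : min a x ≤ min b x := by omega
    have hle : xs.foldl min (min b x) ≤ x :=
      le_trans (pv_foldl_min_le xs (min b x)) (min_le_right _ _)
    calc (x :: xs).foldl min a = xs.foldl min (min a x) := by simp
    _ = min (min a x) (xs.foldl min (min b x)) := ih _ _ hx
    _ = min a (min x (xs.foldl min (min b x))) := by rw [min_assoc]
    _ = min a (xs.foldl min (min b x)) := by rw [min_eq_right hle]
    _ = min a ((x :: xs).foldl min b) := by simp

-- PySem.List.min? on a nonempty Int list with key id is a foldl of min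
theorem pv_min?_cons : ∀ (xs : List Int) (a : Int),
    PySem.List.min? (a :: xs) id = some (xs.foldl min a) := by
  intro xs
  induction xs with
  | nil => intro a; simp [PySem.List.min?]
  | cons y ys ih =>
    intro a
    have hstep : PySem.List.min? (a :: y :: ys) id
        = PySem.List.min? ((if y < a then y else a) :: ys) id := by
      by_cases h : y < a <;> simp [PySem.List.min?, h]
    rw [hstep]
    by_cases h : y < a
    · rw [if_pos h, ih y]
      simp [min_eq_right (le_of_lt h)]
    · rw [if_neg h, ih a]
      simp [min_eq_left (le_of_not_gt h)]

theorem pv_minD_cons (x : Int) (xs : List Int) (hx : x ≤ 5) :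
    PySem.List.minD (x :: xs) id 5 = min x (PySem.List.minD xs id 5) := by
  cases xs with
  | nil => simp [PySem.List.minD, PySem.List.min?, min_eq_left hx]
  | cons y ys =>
    calc PySem.List.minD (x :: y :: ys) id 5
        = (y :: ys).foldl min x := by
          simp [PySem.List.minD, pv_min?_cons]
    _ = ys.foldl min (min x y) := by simp
    _ = min (min x y) (ys.foldl min y) := pv_foldl_min_acc ys (min x y) y (min_le_right _ _)
    _ = min x (min y (ys.foldl min y)) := by rw [min_assoc]
    _ = min x (ys.foldl min y) := by rw [min_eq_right (pv_foldl_min_le ys y)]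
    _ = min x (PySem.List.minD (y :: ys) id 5) := by
          simp [PySem.List.minD, pv_min?_cons]

-- A's boolean cascade, expressed as the rank A's branch order induces on the whole list
def pvArank (l : List String) : Int :=
  if l.any (fun c => PySem.Str.isIn "China" c) then 0
  else if l.any (fun c => PySem.Str.isIn "United States" c) then 1
  else if l.any (fun c => pvEurope.contains c) then 2
  else if l.any (fun c => PySem.Str.isIn "United Arab Emirates" c) then 3
  else if l.any (fun c => PySem.Str.isIn "Canada" c) then 4
  else 5

set_option maxHeartbeats 1000000 in
theorem pvArank_cons (c : String) (l : List String) :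
    pvArank (c :: l) = min (pvRank c) (pvArank l) := by
  unfold pvArank pvRank
  simp only [List.any_cons]
  by_cases h0 : PySem.Str.isIn "China" c = true <;>
  by_cases h1 : PySem.Str.isIn "United States" c = true <;>
  by_cases h2 : pvEurope.contains c = true <;>
  by_cases h3 : PySem.Str.isIn "United Arab Emirates" c = true <;>
  by_cases h4 : PySem.Str.isIn "Canada" c = true <;>
  (try simp only [Bool.not_eq_true] at h0) <;>
  (try simp only [Bool.not_eq_true] at h1) <;>
  (try simp only [Bool.not_eq_true] at h2) <;>
  (try simp only [Bool.not_eq_true] at h3) <;>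
  (try simp only [Bool.not_eq_true] at h4) <;>
  simp only [h0, h1, h2, h3, h4, Bool.true_or, Bool.false_or, reduceIte] <;>
  split_ifs <;> first | omega | exact False.elim (by assumption)

-- key lemma: B's best rank equals the rank induced by A's cascade
theorem pv_best_eq_arank (l : List String) :
    PySem.List.minD (l.map pvRank) id 5 = pvArank l := by
  induction l with
  | nil => simp [PySem.List.minD, PySem.List.min?, pvArank]
  | cons c l ih =>
    rw [List.map_cons, pv_minD_cons (pvRank c) _ (pvRank_le_five c), ih, pvArank_cons]

-- the two function bodies agree, over an arbitrary countries list
theorem pv_main (l : List String) :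
    (if l.any (fun c => PySem.Str.isIn "China" c) then "China"
     else if l.any (fun c => PySem.Str.isIn "United States" c) then "United States"
     else if l.any (fun c => pvEurope.contains c) then "Europe"
     else if l.any (fun c => PySem.Str.isIn "United Arab Emirates" c) then "United Arab Emirates"
     else if l.any (fun c => PySem.Str.isIn "Canada" c) then "Canada"
     else PySem.Dict.getD pvCountryNameMap ((PySem.List.pyGet? l 0).getD "") ((PySem.List.pyGet? l 0).getD "")) =
    (if PySem.List.minD (l.map pvRank) id 5 < 5 then
      (PySem.List.pyGet? pvRegions (PySem.List.minD (l.map pvRank) id 5)).getD ""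
     else PySem.Dict.getD pvCountryNameMap ((PySem.List.pyGet? l 0).getD "") ((PySem.List.pyGet? l 0).getD "")) := by
  rw [pv_best_eq_arank]
  unfold pvArank
  split_ifs <;> first | rfl | decide | omega

-- ===== VERDICT (by name: the statement is the Claim_ definition above) =====
theorem assign_region_spec : Claim_equal_assign_region := by
  intro country_str _
  unfold Spec_assign_region assign_region assign_region_alt
  exact pv_main (((PySem.Str.split? country_str ",").getD []).map PySem.Str.strip)
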